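-- pv_equiv track=rewrite | github.com/Key3952/Kata_Judge_Sys | app.py | tablo_sort_and_assign_places
-- ===== SOURCE A (Python) =====
-- def tablo_sort_and_assign_places(results: list) -> list:
--     """Места только у пар с полной суммой; сортировка: по месту (лучшие выше), без месты — по номеру пары."""
--     ranked = [r for r in results if r.get('final_score') is not None]
--     unranked = [r for r in results if r.get('final_score') is None]
--     ranked.sort(key=lambda x: (-x['final_score'], x['pair_number']))
--     for i, r in enumerate(ranked):
--         r['place'] = i + 1
--     for r in unranked:
--         r['place'] = None
--     unranked.sort(key=lambda x: x['pair_number'])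
--     return ranked + unranked
-- ===== SOURCE B (Python) =====
-- def tablo_sort_and_assign_places(results: list) -> list:
--     """One stable sort with a composite group key, then a single place-assignment pass."""
--     def key(r):
--         fs = r.get('final_score')
--         if fs is not None:
--             return (0, -fs, r['pair_number'])
--         return (1, r['pair_number'], 0)
--     ordered = sorted(results, key=key)
--     for i, r in enumerate(ordered):
--         r['place'] = i + 1 if r.get('final_score') is not None else None
--     return ordered
-- ===== Notes on version B (the rewrite author's own statement) =====
-- stated objective: simpler
-- what changed: Replaces the partition-into-two-lists-plus-two-sorts with one stable sort under a composite (group, -score, pair) tuple key and a single enumerate pass assigning places, exploiting that ranked items end up contiguous at the front.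
import Mathlib
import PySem

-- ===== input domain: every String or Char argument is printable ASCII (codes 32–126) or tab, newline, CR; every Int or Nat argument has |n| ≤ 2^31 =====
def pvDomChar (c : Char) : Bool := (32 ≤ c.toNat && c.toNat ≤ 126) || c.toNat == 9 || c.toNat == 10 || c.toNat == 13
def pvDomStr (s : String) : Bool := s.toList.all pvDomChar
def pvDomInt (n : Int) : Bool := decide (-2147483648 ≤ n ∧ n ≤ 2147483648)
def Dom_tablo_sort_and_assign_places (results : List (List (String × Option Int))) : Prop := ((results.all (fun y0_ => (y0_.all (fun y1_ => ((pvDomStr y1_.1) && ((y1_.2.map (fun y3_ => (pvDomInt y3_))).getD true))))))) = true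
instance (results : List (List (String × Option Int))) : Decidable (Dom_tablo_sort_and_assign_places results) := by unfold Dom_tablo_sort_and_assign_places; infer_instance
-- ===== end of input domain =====

-- B replaces A's partition + two sorts by ONE stable sort under a composite lexicographic
-- key and a single enumerate pass that assigns places (objective: simpler; same O(n log n)).
-- Both A and B mutate the input dicts in place in Python; the equivalence proved here is
-- about the returned list (which contains the same updated dicts in both).

-- r.get('final_score')  /  r['pair_number'] (total rendering; under Pre_ the default never fires)
def pvGetFS (r : List (String × Option Int)) : Option Int := (PySem.Dict.mk r).getD "final_score" none
def pvGetPN (r : List (String × Option Int)) : Int := ((PySem.Dict.mk r).getD "pair_number" none).getD 0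

-- ===== PORT A =====
def tablo_sort_and_assign_places (results : List (List (String × Option Int))) : List (List (String × Option Int)) :=
  let ranked := results.filter (fun r => (pvGetFS r).isSome)
  let unranked := results.filter (fun r => !(pvGetFS r).isSome)
  let ranked2 := PySem.List.sorted2 ranked (fun x => -((pvGetFS x).getD 0)) (fun x => pvGetPN x)
  let ranked3 := (PySem.List.enumerate ranked2 0).map
    (fun p => ((PySem.Dict.mk p.2).insert "place" (some (p.1 + 1))).items)
  let unranked2 := unranked.map (fun r => ((PySem.Dict.mk r).insert "place" none).items)
  let unranked3 := PySem.List.sorted unranked2 (fun x => pvGetPN x)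
  ranked3 ++ unranked3

-- ===== PORT B =====
-- B's composite tuple key (0, -fs, pn) / (1, pn, 0); Python's tuple comparison on these
-- equal-length int tuples is exactly the lexicographic order on List Int
def pvKeyB (r : List (String × Option Int)) : List Int :=
  match pvGetFS r with
  | some v => [0, -v, pvGetPN r]
  | none   => [1, pvGetPN r, 0]

def tablo_sort_and_assign_places_alt (results : List (List (String × Option Int))) : List (List (String × Option Int)) :=
  let ordered := PySem.List.sorted results pvKeyB
  (PySem.List.enumerate ordered 0).map
    (fun p => ((PySem.Dict.mk p.2).insert "place"
      (if (pvGetFS p.2).isSome then some (p.1 + 1) else none)).items)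

-- ===== PRECONDITION & SPEC =====
-- Pre_ admits dicts with an int 'pair_number', plus 'pair_number is None' rows that A's
-- comparisons tolerate (a ranked row whose final_score ties only other None-'pair_number'
-- rows, so the tuple keys compare equal; or the single unranked row); everywhere outside
-- Pre_ A raises (KeyError for a missing key, TypeError comparing None).
def Pre_tablo_sort_and_assign_places (results : List (List (String × Option Int))) : Prop :=
  (results.all (fun r =>
    (PySem.Dict.mk r).contains "pair_number" &&
    (match (PySem.Dict.mk r).getD "pair_number" none with
     | some _ => true
     | none =>
       match (PySem.Dict.mk r).getD "final_score" none with
       | some v => results.all (fun s =>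
           !((PySem.Dict.mk s).getD "final_score" none == some v) ||
           ((PySem.Dict.mk s).getD "pair_number" none == none))
       | none => decide (results.countP
           (fun s => ((PySem.Dict.mk s).getD "final_score" none) == none) ≤ 1)))) = true
instance (results : List (List (String × Option Int))) : Decidable (Pre_tablo_sort_and_assign_places results) := by unfold Pre_tablo_sort_and_assign_places; infer_instance

def pvWitness_tablo_sort_and_assign_places : (List (List (String × Option Int))) :=
  [[("pair_number", some 1), ("final_score", some 5)], [("pair_number", some 2), ("final_score", none)]]

def Spec_tablo_sort_and_assign_places (results : List (List (String × Option Int))) (out : List (List (String × Option Int))) : Prop := out = tablo_sort_and_assign_places_alt results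
instance (results : List (List (String × Option Int))) (out : List (List (String × Option Int))) : Decidable (Spec_tablo_sort_and_assign_places results out) := by unfold Spec_tablo_sort_and_assign_places; infer_instance

-- ===== CLAIM (what is proved, stated in full; the proofs are below) =====
def Claim_equal_tablo_sort_and_assign_places : Prop := ∀ (results : List (List (String × Option Int))), Dom_tablo_sort_and_assign_places results → Pre_tablo_sort_and_assign_places results → Spec_tablo_sort_and_assign_places results (tablo_sort_and_assign_places results)

-- ===== LEMMAS AND PROOFS =====

-- abbreviations for the three comparison predicates
def pvP (r : List (String × Option Int)) : Bool := (pvGetFS r).isSome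
def pvBB (a b : List (String × Option Int)) : Bool := decide (pvKeyB a < pvKeyB b)
def pvBA (a b : List (String × Option Int)) : Bool :=
  decide ((-((pvGetFS a).getD 0) : Int) < -((pvGetFS b).getD 0)) ||
  (!decide ((-((pvGetFS b).getD 0) : Int) < -((pvGetFS a).getD 0)) && decide (pvGetPN a < pvGetPN b))
def pvBU (a b : List (String × Option Int)) : Bool := decide (pvGetPN a < pvGetPN b)

lemma pvBB_rr {a b : List (String × Option Int)} (ha : pvP a = true) (hb : pvP b = true) :
    pvBB a b = pvBA a b := by
  unfold pvP at ha hb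
  obtain ⟨va, hva⟩ := Option.isSome_iff_exists.mp ha
  obtain ⟨vb, hvb⟩ := Option.isSome_iff_exists.mp hb
  have key : (pvKeyB a < pvKeyB b) ↔ (-va < -vb ∨ (-va = -vb ∧ pvGetPN a < pvGetPN b)) := by
    unfold pvKeyB; rw [hva, hvb]; simp [List.cons_lt_cons_iff]
  unfold pvBB pvBA
  rw [hva, hvb]
  simp only [Option.getD_some]
  by_cases h1 : (-va : Int) < -vb
  · simp [key, h1]
  · by_cases h2 : (-vb : Int) < -va
    · have hne : ¬(-va : Int) = -vb := by omega
      simp [key, h1, h2, hne]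
    · have he : (-va : Int) = -vb := by omega
      by_cases h3 : pvGetPN a < pvGetPN b <;> simp [key, he, h3]

lemma pvBB_uu {a b : List (String × Option Int)} (ha : pvP a = false) (hb : pvP b = false) :
    pvBB a b = pvBU a b := by
  unfold pvP at ha hb
  rw [Option.isSome_eq_false_iff, Option.isNone_iff_eq_none] at ha hb
  have key : (pvKeyB a < pvKeyB b) ↔ pvGetPN a < pvGetPN b := by
    unfold pvKeyB; rw [ha, hb]; simp [List.cons_lt_cons_iff]
  unfold pvBB pvBU
  by_cases h3 : pvGetPN a < pvGetPN b <;> simp [key, h3]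

lemma pvBB_ru {a b : List (String × Option Int)} (ha : pvP a = true) (hb : pvP b = false) :
    pvBB a b = true := by
  unfold pvP at ha hb
  obtain ⟨va, hva⟩ := Option.isSome_iff_exists.mp ha
  rw [Option.isSome_eq_false_iff, Option.isNone_iff_eq_none] at hb
  unfold pvBB pvKeyB
  rw [hva, hb]
  simp [List.cons_lt_cons_iff]

lemma pvBB_ur {a b : List (String × Option Int)} (ha : pvP a = false) (hb : pvP b = true) :
    pvBB a b = false := by
  unfold pvP at ha hb
  obtain ⟨vb, hvb⟩ := Option.isSome_iff_exists.mp hb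
  rw [Option.isSome_eq_false_iff, Option.isNone_iff_eq_none] at ha
  unfold pvBB pvKeyB
  rw [ha, hvb]
  simp [List.cons_lt_cons_iff]

-- insertBy plumbing
lemma insertBy_all_true {α : Type} (before : α → α → Bool) (x : α) (l : List α)
    (h : ∀ y ∈ l, before x y = true) : PySem.List.insertBy before x l = x :: l := by
  cases l with
  | nil => rfl
  | cons y ys => simp [PySem.List.insertBy, h y (by simp)]

lemma insertBy_append_right_true {α : Type} (before : α → α → Bool) (x : α) (l1 l2 : List α)
    (h : ∀ y ∈ l2, before x y = true) :
    PySem.List.insertBy before x (l1 ++ l2) = PySem.List.insertBy before x l1 ++ l2 := by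
  induction l1 with
  | nil => simp [insertBy_all_true before x l2 h, PySem.List.insertBy]
  | cons a l1 ih =>
      simp only [List.cons_append, PySem.List.insertBy]
      by_cases hx : before x a = true <;> simp [hx, ih]

lemma insertBy_append_left_false {α : Type} (before : α → α → Bool) (x : α) (l1 l2 : List α)
    (h : ∀ y ∈ l1, before x y = false) :
    PySem.List.insertBy before x (l1 ++ l2) = l1 ++ PySem.List.insertBy before x l2 := by
  induction l1 with
  | nil => rfl
  | cons a l1 ih =>
      simp only [List.cons_append, PySem.List.insertBy]
      have : before x a = false := h a (by simp)
      simp [this]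
      exact ih (fun y hy => h y (by simp [hy]))

lemma insertBy_congr {α : Type} (f g : α → α → Bool) (x : α) (l : List α)
    (h : ∀ y ∈ l, f x y = g x y) : PySem.List.insertBy f x l = PySem.List.insertBy g x l := by
  induction l with
  | nil => rfl
  | cons a l ih =>
      simp only [PySem.List.insertBy]
      rw [h a (by simp), ih (fun y hy => h y (by simp [hy]))]

-- the partition lemma: one stable sort with the composite key is the two group sorts concatenated
lemma pvMain (xs l1 l2 : List (List (String × Option Int)))
    (h1 : ∀ y ∈ l1, pvP y = true) (h2 : ∀ y ∈ l2, pvP y = false) :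
    xs.foldl (fun acc x => PySem.List.insertBy pvBB x acc) (l1 ++ l2)
    = (xs.filter pvP).foldl (fun acc x => PySem.List.insertBy pvBA x acc) l1
      ++ (xs.filter (fun x => !pvP x)).foldl (fun acc x => PySem.List.insertBy pvBU x acc) l2 := by
  induction xs generalizing l1 l2 with
  | nil => rfl
  | cons x xs ih =>
      by_cases hx : pvP x = true
      · simp only [List.foldl_cons, List.filter_cons, hx, Bool.not_true, if_true]
        rw [insertBy_append_right_true pvBB x l1 l2 (fun y hy => pvBB_ru hx (h2 y hy)),
            insertBy_congr pvBB pvBA x l1 (fun y hy => pvBB_rr hx (h1 y hy))]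
        exact ih (PySem.List.insertBy pvBA x l1) l2
          (fun y hy => by
            rcases (PySem.List.mem_insertBy _ _ _ _).mp hy with h | h
            · exact h ▸ hx
            · exact h1 y h) h2
      · have hx' : pvP x = false := by simpa using hx
        simp only [List.foldl_cons, List.filter_cons, hx', Bool.not_false, if_true]
        rw [insertBy_append_left_false pvBB x l1 l2 (fun y hy => pvBB_ur hx' (h1 y hy)),
            insertBy_congr pvBB pvBU x l2 (fun y hy => pvBB_uu hx' (h2 y hy))]
        exact ih l1 (PySem.List.insertBy pvBU x l2) h1
          (fun y hy => by
            rcases (PySem.List.mem_insertBy _ _ _ _).mp hy with h | h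
            · exact h ▸ hx'
            · exact h2 y h)

lemma pvSortSplit (results : List (List (String × Option Int))) :
    PySem.List.sorted results pvKeyB
    = PySem.List.sorted2 (results.filter pvP)
        (fun x => -((pvGetFS x).getD 0)) (fun x => pvGetPN x)
      ++ PySem.List.sorted (results.filter (fun x => !pvP x)) (fun x => pvGetPN x) := by
  exact pvMain results [] [] (by simp) (by simp)

-- 'place' insertion does not touch the 'pair_number' key
def pvIns0 (r : List (String × Option Int)) : List (String × Option Int) :=
  ((PySem.Dict.mk r).insert "place" none).items

lemma pvGetPN_ins0 (r : List (String × Option Int)) : pvGetPN (pvIns0 r) = pvGetPN r := by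
  unfold pvGetPN pvIns0
  rw [show PySem.Dict.mk (((PySem.Dict.mk r).insert "place" none).items)
        = (PySem.Dict.mk r).insert "place" none from rfl]
  rw [PySem.Dict.getD_insert, if_neg (by decide)]

-- sorting by pair number commutes with the 'place' := None update
lemma insertBy_map_ins0 (x : List (String × Option Int)) (l : List (List (String × Option Int))) :
    PySem.List.insertBy (fun a b => decide (pvGetPN a < pvGetPN b)) (pvIns0 x) (l.map pvIns0)
    = (PySem.List.insertBy (fun a b => decide (pvGetPN a < pvGetPN b)) x l).map pvIns0 := by
  induction l with
  | nil => rfl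
  | cons a l ih =>
      simp only [List.map_cons, PySem.List.insertBy, pvGetPN_ins0]
      by_cases h : decide (pvGetPN x < pvGetPN a) = true <;> simp [h, ih]

lemma pvSortMapIns0 (l : List (List (String × Option Int))) :
    PySem.List.sorted (l.map pvIns0) (fun x => pvGetPN x)
    = (PySem.List.sorted l (fun x => pvGetPN x)).map pvIns0 := by
  simp only [PySem.List.sorted]
  have : ∀ (acc : List (List (String × Option Int))),
      (l.map pvIns0).foldl (fun acc x => PySem.List.insertBy (fun a b => decide (pvGetPN a < pvGetPN b)) x acc) (acc.map pvIns0)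
      = (l.foldl (fun acc x => PySem.List.insertBy (fun a b => decide (pvGetPN a < pvGetPN b)) x acc) acc).map pvIns0 := by
    induction l with
    | nil => intro acc; rfl
    | cons a l ih =>
        intro acc
        simp only [List.map_cons, List.foldl_cons]
        rw [insertBy_map_ins0, ih]
  simpa using this []

-- the enumerate pass, split over the two groups
lemma pvEnumRanked (s : List (List (String × Option Int))) (n : Int)
    (h : ∀ r ∈ s, pvP r = true) :
    (PySem.List.enumerate s n).map
      (fun p => ((PySem.Dict.mk p.2).insert "place"
        (if (pvGetFS p.2).isSome then some (p.1 + 1) else none)).items)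
    = (PySem.List.enumerate s n).map
      (fun p => ((PySem.Dict.mk p.2).insert "place" (some (p.1 + 1))).items) := by
  induction s generalizing n with
  | nil => rfl
  | cons a s ih =>
      have ha : (pvGetFS a).isSome = true := h a (by simp)
      simp only [PySem.List.enumerate_cons, List.map_cons, ha, if_true]
      rw [ih (n + 1) (fun r hr => h r (by simp [hr]))]

lemma pvEnumUnranked (s : List (List (String × Option Int))) (n : Int)
    (h : ∀ r ∈ s, pvP r = false) :
    (PySem.List.enumerate s n).map
      (fun p => ((PySem.Dict.mk p.2).insert "place"
        (if (pvGetFS p.2).isSome then some (p.1 + 1) else none)).items)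
    = s.map pvIns0 := by
  induction s generalizing n with
  | nil => rfl
  | cons a s ih =>
      have ha : (pvGetFS a).isSome = false := h a (by simp)
      simp only [PySem.List.enumerate_cons, List.map_cons, ha]
      rw [ih (n + 1) (fun r hr => h r (by simp [hr]))]
      rfl

-- ===== VERDICT (by name: the statement is the Claim_ definition above) =====
theorem tablo_sort_and_assign_places_spec : Claim_equal_tablo_sort_and_assign_places := by
  intro results _ _
  unfold Spec_tablo_sort_and_assign_places
  unfold tablo_sort_and_assign_places tablo_sort_and_assign_places_alt
  simp only []
  rw [show (fun r => (pvGetFS r).isSome) = pvP from rfl]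
  rw [show (fun r => !(pvGetFS r).isSome) = (fun x => !pvP x) from rfl]
  rw [pvSortSplit]
  rw [PySem.List.enumerate_append, List.map_append]
  have hR : ∀ r ∈ PySem.List.sorted2 (results.filter pvP)
      (fun x => -((pvGetFS x).getD 0)) (fun x => pvGetPN x), pvP r = true := by
    intro r hr
    have := (PySem.List.sorted2_perm (results.filter pvP)
      (fun x => -((pvGetFS x).getD 0)) (fun x => pvGetPN x) false).mem_iff.mp hr
    exact (List.mem_filter.mp this).2
  have hU : ∀ r ∈ PySem.List.sorted (results.filter (fun x => !pvP x)) (fun x => pvGetPN x),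
      pvP r = false := by
    intro r hr
    have := (PySem.List.mem_sorted _ _ _ _).mp hr
    simpa using (List.mem_filter.mp this).2
  rw [pvEnumRanked _ 0 hR, pvEnumUnranked _ _ hU]
  rw [show (fun r => ((PySem.Dict.mk r).insert "place" none).items) = pvIns0 from rfl]
  rw [pvSortMapIns0]
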